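-- pv_equiv track=rewrite | github.com/karim-farhang/ICPC-Problem-Solveing | HackerEarth/Alic_message.py | alic_message
-- ===== SOURCE A (Python) =====
-- import string
-- import string
--
-- def alic_message(siz, arr):
--     if siz == 1:
--         return 1
--     if siz == 0:
--         return 0
--     else:
--         a = list(string.ascii_lowercase)[::-1]
--         decode = []
--         for i in arr:
--             x = []
--             for j in i:
--                 if a.index(j) < len(a) / 2:
--                     x.append(j)
--             decode.append(x)
--         while decode.count([]) > 1:
--             decode.remove([])
--         r = ''
--         for i in decode:
--             for j in i:
--                 r += j
--         r = set(list(r))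
--         for i in r:
--             if a.index(i) > len(a) / 2:
--                 r.remove(i)
--         return len(r) - 1
-- ===== SOURCE B (Python) =====
-- def alic_message(siz, arr):
--     if siz == 1:
--         return 1
--     if siz == 0:
--         return 0
--     kept = set()
--     for s in arr:
--         for ch in s:
--             if 'n' <= ch <= 'z':
--                 kept.add(ch)
--     return len(kept) - 1
-- ===== Notes on version B (the rewrite author's own statement) =====
-- stated objective: faster
-- what changed: Replaces A's five passes (per-string filtered lists, a quadratic empty-list pruning while-loop, quadratic string concatenation, set(), and a dead removal loop) by one direct accumulation of the kept characters into a single set with a range comparison 'n' <= ch <= 'z' instead of an O(26) list.index scan per character.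
-- crash fix: On inputs with siz not in {0,1} containing any character outside 'a'..'z', A raises ValueError from list.index; B returns the count of distinct letters n..z minus 1. — e.g. on alic_message(2, ["No!", "pz"]): A raises ValueError, B returns 2
import Mathlib
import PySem

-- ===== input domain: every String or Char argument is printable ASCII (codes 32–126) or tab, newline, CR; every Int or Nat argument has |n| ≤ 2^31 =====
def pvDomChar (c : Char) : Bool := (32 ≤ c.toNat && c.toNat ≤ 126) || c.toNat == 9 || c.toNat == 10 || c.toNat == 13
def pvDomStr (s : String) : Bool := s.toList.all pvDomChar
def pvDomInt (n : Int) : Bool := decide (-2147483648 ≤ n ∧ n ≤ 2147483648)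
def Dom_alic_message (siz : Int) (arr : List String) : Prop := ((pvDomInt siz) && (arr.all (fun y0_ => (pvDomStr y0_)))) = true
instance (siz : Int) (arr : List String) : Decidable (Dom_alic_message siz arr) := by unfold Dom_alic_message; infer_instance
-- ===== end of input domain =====

-- B replaces A's five differently-shaped passes (per-string filtered lists, an empty-list pruning
-- while-loop, string concatenation, set(), a dead removal loop) by one direct accumulation of the
-- kept characters into a single set, using a range comparison instead of list.index (objective: faster, measured).


-- ===== PORT A =====
-- a = list(string.ascii_lowercase)[::-1]  ([::-1] ported as List.reverse, cf. slice?_none_none_neg_one)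
def pvAlpharev : List Char := "abcdefghijklmnopqrstuvwxyz".toList.reverse

-- a.index(j): ValueError (index? = none) is excluded by Pre_; default 26 is arbitrary there.
def pvAIdx (j : Char) : Nat := (PySem.List.index? pvAlpharev j).getD 26

-- count_erase_lt, cited by pruneEmpties's decreasing_by, must precede it.
theorem pvCountEraseLt {l : List (List Char)} (h : 1 < l.count ([] : List Char)) :
    ((PySem.List.remove? l ([] : List Char)).getD l).count ([] : List Char)
      < l.count ([] : List Char) := by
  have hmem : ([] : List Char) ∈ l := List.count_pos_iff.mp (by omega)
  rw [PySem.List.remove?_eq_some_erase l _ hmem]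
  simp [List.count_erase_self]
  omega

-- while decode.count([]) > 1: decode.remove([])
def pruneEmpties (l : List (List Char)) : List (List Char) :=
  if h : 1 < l.count ([] : List Char) then
    pruneEmpties ((PySem.List.remove? l ([] : List Char)).getD l)
  else l
termination_by l.count ([] : List Char)
decreasing_by exact pvCountEraseLt h

def alic_message (siz : Int) (arr : List String) : Int :=
  if siz = 1 then 1
  else if siz = 0 then 0
  else
    -- decode = [] ; for i in arr: x = [] ; for j in i: if a.index(j) < len(a)/2: x.append(j) ; decode.append(x)
    -- (len(a)/2 = 13.0; index < 13.0 ↔ index < 13 on Nat)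
    let decode := arr.foldl (fun decode i =>
      decode ++ [i.toList.foldl (fun x j => if pvAIdx j < 13 then x ++ [j] else x) []]) []
    let decode := pruneEmpties decode
    -- r = '' ; for i in decode: for j in i: r += j   (string built as List Char)
    let r := decode.foldl (fun r i => i.foldl (fun r j => r ++ [j]) r) ([] : List Char)
    -- r = set(list(r))
    let r := PySem.Set.ofList r
    -- for i in r: if a.index(i) > len(a)/2: r.remove(i)
    -- (within Pre_ the condition never fires, so folding over the set's own list is exact;
    --  the mutation-during-iteration RuntimeError can only occur outside Pre_)
    let r := r.foldl (fun r i =>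
      if pvAIdx i > 13 then (PySem.Set.remove? r i).getD r else r) r
    PySem.Set.len r - 1

-- ===== PORT B =====
def alic_message_alt (siz : Int) (arr : List String) : Int :=
  if siz = 1 then 1
  else if siz = 0 then 0
  else
    let kept := arr.foldl (fun kept s =>
      s.toList.foldl (fun kept ch =>
        if 'n' ≤ ch ∧ ch ≤ 'z' then PySem.Set.add kept ch else kept) kept)
      (PySem.Set.empty : PySem.Set Char)
    PySem.Set.len kept - 1

-- ===== PRECONDITION & SPEC =====
-- A raises ValueError (a.index) as soon as some character of arr is not a lowercase ASCII letter
-- (unless the siz = 0 / siz = 1 guards return first); Pre_ excludes exactly those inputs.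
def Pre_alic_message (siz : Int) (arr : List String) : Prop :=
  siz = 1 ∨ siz = 0 ∨ (arr.all (fun s => s.toList.all (fun c => 'a' ≤ c && c ≤ 'z'))) = true
instance (siz : Int) (arr : List String) : Decidable (Pre_alic_message siz arr) := by
  unfold Pre_alic_message; infer_instance

def pvWitness_alic_message : Int × List String := (2, ["nopq", "az"])

-- On inputs with siz ∉ {0,1} containing a character outside 'a'..'z', A raises ValueError
-- from list.index; B returns the number of distinct letters 'n'..'z' present, minus 1.
def Raises_alic_message (siz : Int) (arr : List String) : Prop :=
  siz ≠ 1 ∧ siz ≠ 0 ∧ (arr.all (fun s => s.toList.all (fun c => 'a' ≤ c && c ≤ 'z'))) = false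
instance (siz : Int) (arr : List String) : Decidable (Raises_alic_message siz arr) := by
  unfold Raises_alic_message; infer_instance
def pvRaiseWitness_alic_message : Int × List String := (2, ["No!", "pz"])
def pvRaiseWitnessOut_alic_message : Int := 2

def Spec_alic_message (siz : Int) (arr : List String) (out : Int) : Prop := out = alic_message_alt siz arr
instance (siz : Int) (arr : List String) (out : Int) : Decidable (Spec_alic_message siz arr out) := by unfold Spec_alic_message; infer_instance

-- ===== CLAIM (what is proved, stated in full; the proofs are below) =====
def Claim_equal_alic_message : Prop := ∀ (siz : Int) (arr : List String), Dom_alic_message siz arr → Pre_alic_message siz arr → Spec_alic_message siz arr (alic_message siz arr)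
def Claim_raises_alic_message : Prop := (∀ (siz : Int) (arr : List String), Dom_alic_message siz arr → Raises_alic_message siz arr → ¬ Pre_alic_message siz arr) ∧ (Dom_alic_message (pvRaiseWitness_alic_message.1) (pvRaiseWitness_alic_message.2) ∧ Raises_alic_message (pvRaiseWitness_alic_message.1) (pvRaiseWitness_alic_message.2) ∧ alic_message_alt (pvRaiseWitness_alic_message.1) (pvRaiseWitness_alic_message.2) = pvRaiseWitnessOut_alic_message)

-- ===== LEMMAS AND PROOFS =====

-- on lowercase characters A's index test agrees with B's range test
theorem pvCondIff (c : Char) (h1 : 'a' ≤ c) (h2 : c ≤ 'z') :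
    decide (pvAIdx c < 13) = decide ('n' ≤ c ∧ c ≤ 'z') := by
  have l1 : 97 ≤ c.toNat := by
    have := Char.le_def.mp h1; exact UInt32.le_iff_toNat_le.mp this
  have l2 : c.toNat ≤ 122 := by
    have := Char.le_def.mp h2; exact UInt32.le_iff_toNat_le.mp this
  have e : Char.ofNat c.toNat = c := Char.ofNat_toNat c
  rw [← e]
  interval_cases hh : c.toNat <;> decide

theorem pvFlattenErase (l : List (List Char)) :
    (l.erase ([] : List Char)).flatten = l.flatten := by
  induction l with
  | nil => rfl
  | cons x t ih =>
    by_cases hx : x = ([] : List Char)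
    · subst hx; simp
    · rw [List.erase_cons_tail (by simpa using hx)]
      simp [ih]

theorem pvFlattenPrune (l : List (List Char)) : (pruneEmpties l).flatten = l.flatten := by
  induction l using pruneEmpties.induct with
  | case1 l h ih =>
    rw [pruneEmpties, dif_pos h]
    have hmem : ([] : List Char) ∈ l := List.count_pos_iff.mp (by omega)
    rw [PySem.List.remove?_eq_some_erase l _ hmem] at ih ⊢
    simpa [pvFlattenErase] using ih
  | case2 l h =>
    rw [pruneEmpties, dif_neg h]

theorem pvFoldlSnoc (l : List Char) (r : List Char) :
    l.foldl (fun r j => r ++ [j]) r = r ++ l := by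
  induction l generalizing r with
  | nil => simp
  | cons x t ih => simp [List.foldl_cons, ih]

theorem pvFoldlAppendFlatten (l : List (List Char)) (r : List Char) :
    l.foldl (fun r i => i.foldl (fun r j => r ++ [j]) r) r = r ++ l.flatten := by
  induction l generalizing r with
  | nil => simp
  | cons x t ih => rw [List.foldl_cons, pvFoldlSnoc, ih]; simp

theorem pvFilterFold (p : Char → Prop) [DecidablePred p] (l : List Char) (x : List Char) :
    l.foldl (fun x j => if p j then x ++ [j] else x) x
      = x ++ l.filter (fun j => decide (p j)) := by
  induction l generalizing x with
  | nil => simp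
  | cons c t ih =>
    by_cases hc : p c <;> simp [List.foldl_cons, hc, ih]

theorem pvDecodeMap (arr : List String) (d : List (List Char)) :
    arr.foldl (fun decode i =>
        decode ++ [i.toList.foldl (fun x j => if pvAIdx j < 13 then x ++ [j] else x) []]) d
      = d ++ arr.map (fun i => i.toList.filter (fun j => pvAIdx j < 13)) := by
  induction arr generalizing d with
  | nil => simp
  | cons s t ih => rw [List.foldl_cons, ih, pvFilterFold]; simp

theorem pvFoldlNoRemove (l : List Char) (r : PySem.Set Char)
    (hl : ∀ i ∈ l, ¬ pvAIdx i > 13) :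
    l.foldl (fun r i => if pvAIdx i > 13 then (PySem.Set.remove? r i).getD r else r) r = r := by
  induction l with
  | nil => rfl
  | cons x t ih =>
    have hx := hl x (by simp)
    simp only [List.foldl_cons, if_neg hx]
    exact ih (fun i hi => hl i (by simp [hi]))

-- ===== VERDICT (by name: the statement is the Claim_ definition above) =====
theorem alic_message_spec : Claim_equal_alic_message := by
  intro siz arr _hdom hpre
  unfold Spec_alic_message alic_message alic_message_alt
  by_cases h1 : siz = 1
  · simp [h1]
  by_cases h0 : siz = 0
  · simp [h0]
  have hlc : ∀ s ∈ arr, ∀ c ∈ s.toList, 'a' ≤ c ∧ c ≤ 'z' := by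
    rcases hpre with h | h | h
    · exact absurd h h1
    · exact absurd h h0
    · intro s hs c hc
      have := (List.all_eq_true.mp (List.all_eq_true.mp h s hs) c hc)
      simpa using this
  simp only [if_neg h1, if_neg h0]
  -- all characters of arr, in traversal order
  set chars : List Char := (arr.map String.toList).flatten with hchars
  have hmemc : ∀ c ∈ chars, 'a' ≤ c ∧ c ≤ 'z' := by
    intro c hc
    rw [hchars, List.mem_flatten] at hc
    obtain ⟨l, hl, hcl⟩ := hc
    rw [List.mem_map] at hl
    obtain ⟨s, hs, rfl⟩ := hl
    exact hlc s hs c hcl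
  -- A's side reduces to Set.ofList (chars.filter pA)
  have hA : (arr.foldl (fun decode i =>
        decode ++ [i.toList.foldl (fun x j => if pvAIdx j < 13 then x ++ [j] else x) []]) [])
      = arr.map (fun i => i.toList.filter (fun j => pvAIdx j < 13)) := by
    simpa using pvDecodeMap arr []
  rw [hA]
  set decode := arr.map (fun i => i.toList.filter (fun j => pvAIdx j < 13)) with hdec
  have hflat : (pruneEmpties decode).flatten = chars.filter (fun j => pvAIdx j < 13) := by
    rw [pvFlattenPrune, hdec, hchars, List.filter_flatten, List.map_map]
    rfl
  have hr : (pruneEmpties decode).foldl (fun r i => i.foldl (fun r j => r ++ [j]) r) ([] : List Char)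
      = chars.filter (fun j => pvAIdx j < 13) := by
    rw [pvFoldlAppendFlatten, hflat]; rfl
  rw [hr]
  -- the removal loop is the identity: every kept character has index < 13
  have hnorem : ∀ i ∈ PySem.Set.ofList (chars.filter (fun j => pvAIdx j < 13)), ¬ pvAIdx i > 13 := by
    intro i hi
    rw [PySem.Set.mem_ofList, List.mem_filter] at hi
    have := hi.2; simp only [decide_eq_true_eq] at this; omega
  rw [pvFoldlNoRemove _ _ hnorem]
  -- B's side is Set.ofList (chars.filter pB), and the two filters agree on chars
  have hB : (arr.foldl (fun kept s =>
        s.toList.foldl (fun kept ch =>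
          if 'n' ≤ ch ∧ ch ≤ 'z' then PySem.Set.add kept ch else kept) kept)
        (PySem.Set.empty : PySem.Set Char))
      = PySem.Set.ofList (chars.filter (fun ch => decide ('n' ≤ ch ∧ ch ≤ 'z'))) := by
    rw [PySem.Set.ofList_eq_foldl, List.foldl_filter, hchars, List.foldl_flatten, List.foldl_map]
    simp only [decide_eq_true_eq]
    rfl
  rw [hB]
  have hfeq : chars.filter (fun j => pvAIdx j < 13)
      = chars.filter (fun ch => decide ('n' ≤ ch ∧ ch ≤ 'z')) := by
    apply List.filter_congr
    intro c hc
    exact pvCondIff c (hmemc c hc).1 (hmemc c hc).2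
  rw [hfeq]

set_option maxRecDepth 8000 in
@[simp]
theorem alic_message_raises : Claim_raises_alic_message := by
  unfold Claim_raises_alic_message
  constructor
  · intro siz arr _hdom hr hp
    obtain ⟨h1, h0, hbad⟩ := hr
    rcases hp with h | h | h
    · exact h1 h
    · exact h0 h
    · rw [h] at hbad; simp at hbad
  · exact ⟨by decide, by decide, by decide⟩
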